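-- pv_equiv track=rewrite | github.com/chainsofheaven23/tt_um_ErrorDetectionEngineIEEE | test/test.py | calculate_expected_segments
-- ===== SOURCE A (Python) =====
-- def calculate_expected_segments(data_in):
--     """
--     Calculates the expected 8-bit outputs.
--     """
--
--     # Extract bits
--     d = [(data_in >> i) & 1 for i in range(8)]
--
--     # Hamming(12,8)
--     h = [0] * 12
--     h[0]  = d[0]^d[1]^d[3]^d[4]^d[6]
--     h[1]  = d[0]^d[2]^d[3]^d[5]^d[6]
--     h[2]  = d[0]
--     h[3]  = d[1]^d[2]^d[3]^d[7]
--     h[4]  = d[1]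
--     h[5]  = d[2]
--     h[6]  = d[3]
--     h[7]  = d[4]^d[5]^d[6]^d[7]
--     h[8]  = d[4]
--     h[9]  = d[5]
--     h[10] = d[6]
--     h[11] = d[7]
--
--     # CRC-8
--     c = [0] * 8
--     c[0] = h[11]^h[10]^h[8]^h[4]^h[3]^h[0]
--     c[1] = h[11]^h[10]^h[9]^h[8]^h[5]^h[4]^h[1]^h[0]
--     c[2] = h[11]^h[10]^h[9]^h[6]^h[5]^h[2]^h[1]^h[0]
--     c[3] = h[11]^h[10]^h[7]^h[6]^h[3]^h[2]^h[1]
--     c[4] = h[11]^h[8]^h[7]^h[4]^h[3]^h[2]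
--     c[5] = h[9]^h[8]^h[5]^h[4]^h[3]
--     c[6] = h[10]^h[9]^h[6]^h[5]^h[4]
--     c[7] = h[11]^h[10]^h[7]^h[6]^h[5]
--
--     # Segment 0 -> {4'b0, h[11:8]}
--     seg0 = (
--         (h[11] << 3) |
--         (h[10] << 2) |
--         (h[9]  << 1) |
--         h[8]
--     )
--
--     # Segment 1 -> h[7:0]
--     seg1 = 0
--     for i in range(8):
--         seg1 |= (h[i] << i)
--
--     # Segment 2 -> c[7:0]
--     seg2 = 0
--     for i in range(8):
--         seg2 |= (c[i] << i)
--
--     return seg0, seg1, seg2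
-- ===== SOURCE B (Python) =====
-- # Table-driven: every output bit is a GF(2)-linear function of data_in's 8 bits,
-- # so each segment is packed from parity masks instead of named XOR equations.
-- _SEG_MASKS = (
--     (16, 32, 64, 128),                      # seg0 bits 0-3 -> h[8..11]
--     (91, 109, 1, 142, 2, 4, 8, 240),        # seg1 bits 0-7 -> h[0..7]
--     (7, 192, 219, 218, 237, 184, 110, 60),  # seg2 bits 0-7 -> c[0..7]
-- )
--
-- def calculate_expected_segments(data_in):
--     d = [(data_in >> i) & 1 for i in range(8)]
--     segs = []
--     for masks in _SEG_MASKS: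
--         out = 0
--         for b, m in enumerate(masks):
--             p = 0
--             for i in range(8):
--                 if (m >> i) & 1:
--                     p ^= d[i]
--             out |= p << b
--         segs.append(out)
--     return segs[0], segs[1], segs[2]
-- ===== Notes on version B (the rewrite author's own statement) =====
-- stated objective: idiomatic
-- what changed: Replaces the explicit named Hamming/CRC XOR equations and intermediate h/c arrays with a precomputed table of GF(2) parity masks over the eight bits of data_in, packing each segment by folding over its mask list.
import Mathlib
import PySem

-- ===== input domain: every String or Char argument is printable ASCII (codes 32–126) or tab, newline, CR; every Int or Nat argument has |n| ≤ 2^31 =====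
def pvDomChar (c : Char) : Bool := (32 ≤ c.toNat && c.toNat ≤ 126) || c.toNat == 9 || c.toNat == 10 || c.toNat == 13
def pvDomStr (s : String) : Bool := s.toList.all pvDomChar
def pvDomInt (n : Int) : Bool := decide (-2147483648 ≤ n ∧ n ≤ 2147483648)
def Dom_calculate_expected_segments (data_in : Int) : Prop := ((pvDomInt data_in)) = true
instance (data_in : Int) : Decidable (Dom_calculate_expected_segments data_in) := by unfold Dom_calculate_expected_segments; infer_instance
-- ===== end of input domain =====

-- B replaces A's named per-bit XOR equations by a table of GF(2) parity masks over data_in's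
-- 8 bits and packs each segment by folding over its mask list (objective: idiomatic/alternative).

-- ===== PORT A =====
-- A's body after the bit extraction, on the eight extracted bits (helper kept literal):
-- h[0..11], c[0..7] and the three segments exactly as the Python writes them.
def pvHammingCrcA (d0 d1 d2 d3 d4 d5 d6 d7 : Int) : Int × Int × Int :=
  let h0  := PySem.Int.bxor (PySem.Int.bxor (PySem.Int.bxor (PySem.Int.bxor d0 d1) d3) d4) d6
  let h1  := PySem.Int.bxor (PySem.Int.bxor (PySem.Int.bxor (PySem.Int.bxor d0 d2) d3) d5) d6
  let h2  := d0
  let h3  := PySem.Int.bxor (PySem.Int.bxor (PySem.Int.bxor d1 d2) d3) d7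
  let h4  := d1
  let h5  := d2
  let h6  := d3
  let h7  := PySem.Int.bxor (PySem.Int.bxor (PySem.Int.bxor d4 d5) d6) d7
  let h8  := d4
  let h9  := d5
  let h10 := d6
  let h11 := d7
  let c0 := PySem.Int.bxor (PySem.Int.bxor (PySem.Int.bxor (PySem.Int.bxor (PySem.Int.bxor h11 h10) h8) h4) h3) h0
  let c1 := PySem.Int.bxor (PySem.Int.bxor (PySem.Int.bxor (PySem.Int.bxor (PySem.Int.bxor (PySem.Int.bxor (PySem.Int.bxor h11 h10) h9) h8) h5) h4) h1) h0
  let c2 := PySem.Int.bxor (PySem.Int.bxor (PySem.Int.bxor (PySem.Int.bxor (PySem.Int.bxor (PySem.Int.bxor (PySem.Int.bxor h11 h10) h9) h6) h5) h2) h1) h0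
  let c3 := PySem.Int.bxor (PySem.Int.bxor (PySem.Int.bxor (PySem.Int.bxor (PySem.Int.bxor (PySem.Int.bxor h11 h10) h7) h6) h3) h2) h1
  let c4 := PySem.Int.bxor (PySem.Int.bxor (PySem.Int.bxor (PySem.Int.bxor (PySem.Int.bxor h11 h8) h7) h4) h3) h2
  let c5 := PySem.Int.bxor (PySem.Int.bxor (PySem.Int.bxor (PySem.Int.bxor h9 h8) h5) h4) h3
  let c6 := PySem.Int.bxor (PySem.Int.bxor (PySem.Int.bxor (PySem.Int.bxor h10 h9) h6) h5) h4
  let c7 := PySem.Int.bxor (PySem.Int.bxor (PySem.Int.bxor (PySem.Int.bxor h11 h10) h7) h6) h5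
  let hs : List Int := [h0, h1, h2, h3, h4, h5, h6, h7, h8, h9, h10, h11]
  let cs : List Int := [c0, c1, c2, c3, c4, c5, c6, c7]
  let seg0 := PySem.Int.bor (PySem.Int.bor (PySem.Int.bor (h11 <<< 3) (h10 <<< 2)) (h9 <<< 1)) h8
  let seg1 := (List.range 8).foldl (fun s (i : Nat) => PySem.Int.bor s (hs.getD i 0 <<< i)) 0
  let seg2 := (List.range 8).foldl (fun s (i : Nat) => PySem.Int.bor s (cs.getD i 0 <<< i)) 0
  (seg0, seg1, seg2)

def calculate_expected_segments (data_in : Int) : Int × Int × Int :=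
  let d := (List.range 8).map (fun (i : Nat) => PySem.Int.band (data_in >>> i) 1)
  pvHammingCrcA (d.getD 0 0) (d.getD 1 0) (d.getD 2 0) (d.getD 3 0)
                (d.getD 4 0) (d.getD 5 0) (d.getD 6 0) (d.getD 7 0)

-- ===== PORT B =====
def pvSegMasks : List (List Int) :=
  [[16, 32, 64, 128],
   [91, 109, 1, 142, 2, 4, 8, 240],
   [7, 192, 219, 218, 237, 184, 110, 60]]

-- out |= (parity of d under mask m) << b, over enumerate(masks)
def pvPackSeg (d : List Int) (masks : List Int) : Int :=
  (PySem.List.enumerate masks).foldl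
    (fun (out : Int) (bm : Int × Int) =>
      let p := (List.range 8).foldl
        (fun (p : Int) (i : Nat) => if PySem.Int.band (bm.2 >>> i) 1 ≠ 0
                    then PySem.Int.bxor p (d.getD i 0) else p) 0
      PySem.Int.bor out (p <<< bm.1.toNat)) 0

def calculate_expected_segments_alt (data_in : Int) : Int × Int × Int :=
  let d := (List.range 8).map (fun (i : Nat) => PySem.Int.band (data_in >>> i) 1)
  let segs := pvSegMasks.map (pvPackSeg d)
  (segs.getD 0 0, segs.getD 1 0, segs.getD 2 0)

-- ===== PRECONDITION & SPEC =====
def Spec_calculate_expected_segments (data_in : Int) (out : Int × Int × Int) : Prop := out = calculate_expected_segments_alt data_in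
instance (data_in : Int) (out : Int × Int × Int) : Decidable (Spec_calculate_expected_segments data_in out) := by unfold Spec_calculate_expected_segments; infer_instance

-- ===== CLAIM (what is proved, stated in full; the proofs are below) =====
def Claim_equal_calculate_expected_segments : Prop := ∀ (data_in : Int), Dom_calculate_expected_segments data_in → Spec_calculate_expected_segments data_in (calculate_expected_segments data_in)

-- ===== LEMMAS AND PROOFS =====

lemma pv_bit01 (n : Int) (k : Nat) :
    PySem.Int.band (n >>> k) 1 = 0 ∨ PySem.Int.band (n >>> k) 1 = 1 := by
  rw [PySem.Int.band_one]
  have h1 := PySem.Int.mod_nonneg (n >>> k) (b := 2) (by norm_num)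
  have h2 := PySem.Int.mod_lt (n >>> k) (b := 2) (by norm_num)
  omega

-- On 0/1 bits, A's explicit Hamming+CRC equations equal B's mask-driven packing.
lemma pv_key (b0 b1 b2 b3 b4 b5 b6 b7 : Int)
    (h0 : b0 = 0 ∨ b0 = 1) (h1 : b1 = 0 ∨ b1 = 1) (h2 : b2 = 0 ∨ b2 = 1)
    (h3 : b3 = 0 ∨ b3 = 1) (h4 : b4 = 0 ∨ b4 = 1) (h5 : b5 = 0 ∨ b5 = 1)
    (h6 : b6 = 0 ∨ b6 = 1) (h7 : b7 = 0 ∨ b7 = 1) :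
    pvHammingCrcA b0 b1 b2 b3 b4 b5 b6 b7 =
      (let d : List Int := [b0, b1, b2, b3, b4, b5, b6, b7]
       let segs := pvSegMasks.map (pvPackSeg d)
       (segs.getD 0 0, segs.getD 1 0, segs.getD 2 0)) := by
  rcases h0 with rfl | rfl <;> rcases h1 with rfl | rfl <;>
    rcases h2 with rfl | rfl <;> rcases h3 with rfl | rfl <;>
    rcases h4 with rfl | rfl <;> rcases h5 with rfl | rfl <;>
    rcases h6 with rfl | rfl <;> rcases h7 with rfl | rfl <;> decide

-- ===== VERDICT (by name: the statement is the Claim_ definition above) =====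
set_option maxHeartbeats 1000000 in
theorem calculate_expected_segments_spec : Claim_equal_calculate_expected_segments := by
  intro n _
  unfold Spec_calculate_expected_segments
  exact pv_key (PySem.Int.band (n >>> (0:Nat)) 1) (PySem.Int.band (n >>> (1:Nat)) 1)
    (PySem.Int.band (n >>> (2:Nat)) 1) (PySem.Int.band (n >>> (3:Nat)) 1)
    (PySem.Int.band (n >>> (4:Nat)) 1) (PySem.Int.band (n >>> (5:Nat)) 1)
    (PySem.Int.band (n >>> (6:Nat)) 1) (PySem.Int.band (n >>> (7:Nat)) 1)
    (pv_bit01 n 0) (pv_bit01 n 1) (pv_bit01 n 2) (pv_bit01 n 3)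
    (pv_bit01 n 4) (pv_bit01 n 5) (pv_bit01 n 6) (pv_bit01 n 7)
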